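-- pv_equiv track=rewrite | github.com/AmyStockberger/asre-weekly-support-report | lib/market_stats.py | summarize_active_pending
-- ===== SOURCE A (Python) =====
-- def _norm(s):
--     return (s or "").strip().lower()
--
-- def summarize_active_pending(rows):
--     """Count actives and pendings (incl. contingent) from the export."""
--     active = 0
--     pending = 0
--     for r in rows:
--         status = _norm(r.get("Status"))
--         if status == "active":
--             active += 1
--         elif status in ("pending", "contingent", "active under contract"):
--             pending += 1
--     return {"active": active, "pending": pending}
-- ===== SOURCE B (Python) =====
-- def _norm(s):
--     return (s or "").strip().lower()
--
-- def summarize_active_pending(rows):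
--     """Count actives and pendings (incl. contingent) from the export."""
--     statuses = [_norm(r.get("Status")) for r in rows]
--     return {
--         "active": statuses.count("active"),
--         "pending": statuses.count("pending")
--         + statuses.count("contingent")
--         + statuses.count("active under contract"),
--     }
-- ===== Notes on version B (the rewrite author's own statement) =====
-- stated objective: simpler
-- what changed: B has no accumulator loop or branches at all: it normalizes statuses in one comprehension and obtains each tally by list.count, staged counting passes instead of A's single classifying loop.
import Mathlib
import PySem

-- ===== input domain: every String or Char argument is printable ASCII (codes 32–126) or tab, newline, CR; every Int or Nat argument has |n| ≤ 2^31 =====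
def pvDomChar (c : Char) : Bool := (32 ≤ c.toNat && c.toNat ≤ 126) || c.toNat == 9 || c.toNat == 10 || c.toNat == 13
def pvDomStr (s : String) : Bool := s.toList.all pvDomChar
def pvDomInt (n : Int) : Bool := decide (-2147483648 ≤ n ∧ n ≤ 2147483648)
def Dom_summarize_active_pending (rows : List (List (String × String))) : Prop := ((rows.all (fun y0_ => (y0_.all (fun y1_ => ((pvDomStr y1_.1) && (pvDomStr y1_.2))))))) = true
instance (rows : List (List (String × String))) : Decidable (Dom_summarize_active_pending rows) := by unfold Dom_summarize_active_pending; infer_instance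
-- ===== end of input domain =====

-- B replaces A's classifying accumulator loop by a normalization pass plus staged
-- list.count passes, one per status of interest (simpler: no branches, no accumulator).

-- ===== PORT A =====
-- _norm(s) for s = r.get("Status") : Option String ('s or ""' maps None to "", and "" to "")
def pvNorm (o : Option String) : String := PySem.Str.lower (PySem.Str.strip (o.getD ""))

def summarize_active_pending (rows : List (List (String × String))) : List (String × Int) :=
  let p := rows.foldl
    (fun (ap : Int × Int) r =>
      let status := pvNorm ((PySem.Dict.mk r).get? "Status")
      if status = "active" then (ap.1 + 1, ap.2)
      else if status = "pending" ∨ status = "contingent" ∨ status = "active under contract" then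
        (ap.1, ap.2 + 1)
      else ap)
    (0, 0)
  [("active", p.1), ("pending", p.2)]

-- ===== PORT B =====
def summarize_active_pending_alt (rows : List (List (String × String))) : List (String × Int) :=
  let statuses := rows.map (fun r => pvNorm ((PySem.Dict.mk r).get? "Status"))
  [("active", (PySem.List.count statuses "active" : Int)),
   ("pending", (PySem.List.count statuses "pending" : Int)
             + (PySem.List.count statuses "contingent" : Int)
             + (PySem.List.count statuses "active under contract" : Int))]

-- ===== PRECONDITION & SPEC =====
def Spec_summarize_active_pending (rows : List (List (String × String))) (out : List (String × Int)) : Prop := out = summarize_active_pending_alt rows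
instance (rows : List (List (String × String))) (out : List (String × Int)) : Decidable (Spec_summarize_active_pending rows out) := by unfold Spec_summarize_active_pending; infer_instance

-- ===== CLAIM =====
def Claim_equal_summarize_active_pending : Prop := ∀ (rows : List (List (String × String))), Dom_summarize_active_pending rows → Spec_summarize_active_pending rows (summarize_active_pending rows)

-- ===== LEMMAS AND PROOFS =====

-- A's fold, seen on the list of normalized statuses: it computes the count of
-- "active" and the sum of the counts of the three pending-like statuses.
theorem pvFoldA_eq (l : List String) (a b : Int) :
    l.foldl
      (fun (ap : Int × Int) status =>
        if status = "active" then (ap.1 + 1, ap.2)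
        else if status = "pending" ∨ status = "contingent" ∨ status = "active under contract" then
          (ap.1, ap.2 + 1)
        else ap)
      (a, b)
    = (a + (l.count "active" : Int),
       b + (l.count "pending" : Int) + (l.count "contingent" : Int)
         + (l.count "active under contract" : Int)) := by
  induction l generalizing a b with
  | nil => simp
  | cons x l ih =>
      simp only [List.foldl_cons, List.count_cons]
      by_cases h1 : x = "active"
      · subst h1; simp [ih]; ring
      · by_cases h2 : x = "pending" ∨ x = "contingent" ∨ x = "active under contract"
        · rcases h2 with h | h | h <;> subst h <;> simp [ih] <;> ring
        · rw [not_or, not_or] at h2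
          obtain ⟨hp, hc, ha⟩ := h2
          simp [ih, if_neg h1, hp, hc, ha]

theorem summarize_active_pending_eq_alt (rows : List (List (String × String))) :
    summarize_active_pending rows = summarize_active_pending_alt rows := by
  unfold summarize_active_pending summarize_active_pending_alt
  have hmap :
      rows.foldl
        (fun (ap : Int × Int) r =>
          let status := pvNorm ((PySem.Dict.mk r).get? "Status")
          if status = "active" then (ap.1 + 1, ap.2)
          else if status = "pending" ∨ status = "contingent" ∨ status = "active under contract" then
            (ap.1, ap.2 + 1)
          else ap)
        (0, 0)
      = (rows.map (fun r => pvNorm ((PySem.Dict.mk r).get? "Status"))).foldl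
          (fun (ap : Int × Int) status =>
            if status = "active" then (ap.1 + 1, ap.2)
            else if status = "pending" ∨ status = "contingent" ∨ status = "active under contract" then
              (ap.1, ap.2 + 1)
            else ap)
          (0, 0) := by
    rw [List.foldl_map]
  simp only [hmap, pvFoldA_eq]
  simp [PySem.List.count_eq]

-- ===== VERDICT =====
theorem summarize_active_pending_spec : Claim_equal_summarize_active_pending := by
  intro rows _
  unfold Spec_summarize_active_pending
  exact summarize_active_pending_eq_alt rows
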